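-- pv_equiv track=rewrite | github.com/Taekyo-Lee/sw_expert_academy | problem_bank/25478/python/stress_test2.py | gen_path_graph
-- ===== SOURCE A (Python) =====
-- def gen_path_graph(N):
--     A = [[0]*N for _ in range(N)]
--     for i in range(N):
--         A[i][i] = 1
--         if i+1 < N:
--             A[i][i+1] = 1
--             A[i+1][i] = 1
--     return A
-- ===== SOURCE B (Python) =====
-- def gen_path_graph(N):
--     return [[1 if abs(i - j) <= 1 else 0 for j in range(N)] for i in range(N)]
-- ===== Notes on version B (the rewrite author's own statement) =====
-- stated objective: simpler
-- what changed: B computes each cell directly from the band predicate (is the column within distance one of the diagonal?) in one nested comprehension, instead of A's zero-fill followed by targeted diagonal and neighbor writes.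
import Mathlib
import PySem

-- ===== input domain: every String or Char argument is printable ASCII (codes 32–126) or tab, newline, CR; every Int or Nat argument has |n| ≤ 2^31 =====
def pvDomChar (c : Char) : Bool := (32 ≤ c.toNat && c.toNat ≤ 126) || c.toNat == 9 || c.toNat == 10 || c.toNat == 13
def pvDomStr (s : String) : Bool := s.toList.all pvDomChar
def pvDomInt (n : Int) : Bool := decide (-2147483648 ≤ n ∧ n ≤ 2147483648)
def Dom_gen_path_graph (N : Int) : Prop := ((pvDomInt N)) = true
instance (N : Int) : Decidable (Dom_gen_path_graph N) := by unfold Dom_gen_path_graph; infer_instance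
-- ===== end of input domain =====

-- B replaces A's zero-fill-then-write-edges construction by one per-cell band predicate; equivalence on all inputs (for N ≤ 0 both return []).

-- ===== PORT A =====
-- A[i][j] = v (indices always valid where A writes): set row i's entry j.
def pvSetCell (m : List (List Int)) (i j : Nat) (v : Int) : List (List Int) :=
  m.set i ((m.getD i []).set j v)

-- one iteration of A's loop body
def pvStepA (n : Nat) (m : List (List Int)) (i : Nat) : List (List Int) :=
  let m1 := pvSetCell m i i 1
  if i + 1 < n then pvSetCell (pvSetCell m1 i (i+1) 1) (i+1) i 1 else m1

-- range(N) and [0]*N are empty for N ≤ 0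
def gen_path_graph (N : Int) : List (List Int) :=
  (List.range N.toNat).foldl (pvStepA N.toNat)
    (List.replicate N.toNat (List.replicate N.toNat 0))

-- ===== PORT B =====
def gen_path_graph_alt (N : Int) : List (List Int) :=
  (List.range N.toNat).map (fun (i : Nat) =>
    (List.range N.toNat).map (fun (j : Nat) => if |(i : Int) - (j : Int)| ≤ 1 then 1 else 0))

-- ===== PRECONDITION & SPEC =====
def Spec_gen_path_graph (N : Int) (out : List (List Int)) : Prop := out = gen_path_graph_alt N
instance (N : Int) (out : List (List Int)) : Decidable (Spec_gen_path_graph N out) := by unfold Spec_gen_path_graph; infer_instance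

-- ===== CLAIM (what is proved, stated in full; the proofs are below) =====
def Claim_equal_gen_path_graph : Prop := ∀ (N : Int), Dom_gen_path_graph N → Spec_gen_path_graph N (gen_path_graph N)

-- ===== LEMMAS AND PROOFS =====

-- matrix given by a cell function
def pvMat (n : Nat) (f : Nat → Nat → Int) : List (List Int) :=
  (List.range n).map (fun r => (List.range n).map (fun c => f r c))

lemma pvMat_congr (n : Nat) (f g : Nat → Nat → Int)
    (h : ∀ r < n, ∀ c < n, f r c = g r c) : pvMat n f = pvMat n g := by
  unfold pvMat
  apply List.map_congr_left
  intro r hr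
  apply List.map_congr_left
  intro c hc
  exact h r (List.mem_range.mp hr) c (List.mem_range.mp hc)

lemma pvSetCell_mat (n i j : Nat) (hi : i < n) (_hj : j < n) (f : Nat → Nat → Int) (v : Int) :
    pvSetCell (pvMat n f) i j v = pvMat n (fun r c => if r = i ∧ c = j then v else f r c) := by
  unfold pvSetCell pvMat
  apply List.ext_getElem
  · simp
  · intro r h1 h2
    simp only [List.length_map, List.length_range] at h2
    rw [List.getElem_set, List.getElem_map, List.getElem_range]
    by_cases hri : i = r
    · subst hri
      rw [if_pos rfl,
          List.getD_eq_getElem _ _ (by simpa using hi),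
          List.getElem_map, List.getElem_range]
      apply List.ext_getElem
      · simp
      · intro c hc1 hc2
        simp only [List.getElem_set, List.getElem_map, List.getElem_range]
        split_ifs with ha hb hc
        · rfl
        · exact absurd ⟨trivial, ha.symm⟩ hb
        · exact absurd hc.2.symm ha
        · rfl
    · rw [if_neg hri, List.getElem_map, List.getElem_range]
      apply List.map_congr_left
      intro c _
      show f r c = if r = i ∧ c = j then v else f r c
      rw [if_neg (fun h => hri h.1.symm)]

-- cell value after k loop iterations
def pvVal (n k r c : Nat) : Int :=
  if min r c < k ∧ max r c < n ∧ r ≤ c + 1 ∧ c ≤ r + 1 then 1 else 0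

lemma pvLoop_inv (n : Nat) : ∀ k, k ≤ n →
    (List.range k).foldl (pvStepA n) (pvMat n (fun _ _ => 0)) = pvMat n (pvVal n k) := by
  intro k
  induction k with
  | zero =>
    intro _
    simp [List.range_zero]
    apply pvMat_congr
    intro r _ c _
    simp [pvVal]
  | succ k ih =>
    intro hk
    rw [List.range_succ, List.foldl_append, ih (Nat.le_of_succ_le hk)]
    simp only [List.foldl_cons, List.foldl_nil]
    have hkn : k < n := hk
    unfold pvStepA
    by_cases hcase : k + 1 < n
    · simp only [hcase, if_true]
      rw [pvSetCell_mat n k k hkn hkn, pvSetCell_mat n k (k+1) hkn hcase,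
          pvSetCell_mat n (k+1) k hcase hkn]
      apply pvMat_congr
      intro r hr c hc
      unfold pvVal
      split_ifs <;> omega
    · simp only [hcase, if_false]
      rw [pvSetCell_mat n k k hkn hkn]
      apply pvMat_congr
      intro r hr c hc
      unfold pvVal
      split_ifs <;> omega

lemma pvReplicate_mat (n : Nat) :
    List.replicate n (List.replicate n (0:Int)) = pvMat n (fun _ _ => 0) := by
  unfold pvMat
  rw [List.map_const', List.length_range, List.map_const', List.length_range]

-- ===== VERDICT (by name: the statement is the Claim_ definition above) =====
theorem gen_path_graph_spec : Claim_equal_gen_path_graph := by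
  intro N _
  unfold Spec_gen_path_graph gen_path_graph gen_path_graph_alt
  rw [pvReplicate_mat, pvLoop_inv N.toNat N.toNat (le_refl _)]
  unfold pvMat
  apply List.map_congr_left
  intro r hr
  apply List.map_congr_left
  intro c hc
  rw [List.mem_range] at hr hc
  unfold pvVal
  simp only [abs_le]
  split_ifs <;> first | rfl | omega
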